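-- pv_equiv track=rewrite | github.com/MalliKarjun008/python-coding-challenges | challenge_20_custom_series.py | custom_series
-- ===== SOURCE A (Python) =====
-- def custom_series(n):
--     if not isinstance(n, int) or n <= 0:
--         raise ValueError("Input must be a positive integer.")
--     series = []
--     diff = 1
--     current = 1
--     while current <= n:
--         series.append(current)
--         current += diff
--         diff += 1
--     return series
-- ===== SOURCE B (Python) =====
-- import math
--
-- def custom_series(n):
--     if not isinstance(n, int) or n <= 0:
--         raise ValueError("Input must be a positive integer.")
--     m = (1 + math.isqrt(8 * n - 7)) // 2
--     return [1 + k * (k - 1) // 2 for k in range(1, m + 1)]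
-- ===== Notes on version B (the rewrite author's own statement) =====
-- stated objective: alternative
-- what changed: Replaces A's incremental while-loop with running current/diff accumulators by a closed form: the term count m is computed directly via an integer square root and the list is built by a comprehension of one-plus-triangular-number terms.
import Mathlib
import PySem

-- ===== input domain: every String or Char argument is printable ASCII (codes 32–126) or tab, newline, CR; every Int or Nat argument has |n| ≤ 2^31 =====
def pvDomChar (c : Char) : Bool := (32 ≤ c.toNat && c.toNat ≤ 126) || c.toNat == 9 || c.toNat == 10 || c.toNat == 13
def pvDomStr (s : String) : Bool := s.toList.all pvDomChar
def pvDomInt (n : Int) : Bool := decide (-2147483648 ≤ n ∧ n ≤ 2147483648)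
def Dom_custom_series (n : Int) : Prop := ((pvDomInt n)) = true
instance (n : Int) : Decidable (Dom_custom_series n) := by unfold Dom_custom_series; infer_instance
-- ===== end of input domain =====

-- B replaces A's incremental current/diff while-loop by a closed-form term count
-- m = (1 + isqrt(8n-7)) // 2 and a comprehension of the terms 1 + k*(k-1)//2 (alternative, same cost).

-- ===== PORT A =====
-- A's while loop, fueled: current increases by at least 1 each step (diff starts at 1
-- and grows), so n.toNat + 1 steps always suffice; each unfolding mirrors one iteration.
def csLoop : Nat → Int → Int → Int → List Int
  | 0, _, _, _ => []
  | fuel + 1, n, current, diff =>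
    if current ≤ n then current :: csLoop fuel n (current + diff) (diff + 1) else []

def custom_series (n : Int) : List Int :=
  if n ≤ 0 then []  -- A raises ValueError here; excluded by Pre_custom_series
  else csLoop (n.toNat + 1) n 1 1

-- ===== PORT B =====
def custom_series_alt (n : Int) : List Int :=
  if n ≤ 0 then []  -- B raises ValueError here; excluded by Pre_custom_series
  else
    let m : Int := PySem.Int.floordiv (1 + (Nat.sqrt (8 * n - 7).toNat : Int)) 2
    (PySem.List.pyRange 1 (m + 1) 1).map (fun k => 1 + PySem.Int.floordiv (k * (k - 1)) 2)

-- ===== PRECONDITION & SPEC =====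
-- Both Pythons raise ValueError("Input must be a positive integer.") for n <= 0.
def Pre_custom_series (n : Int) : Prop := 1 ≤ n
instance (n : Int) : Decidable (Pre_custom_series n) := by unfold Pre_custom_series; infer_instance
def pvWitness_custom_series : Int := (7)

def Spec_custom_series (n : Int) (out : List Int) : Prop := out = custom_series_alt n
instance (n : Int) (out : List Int) : Decidable (Spec_custom_series n out) := by unfold Spec_custom_series; infer_instance

-- ===== CLAIM (what is proved, stated in full; the proofs are below) =====
def Claim_equal_custom_series : Prop := ∀ (n : Int), Dom_custom_series n → Pre_custom_series n → Spec_custom_series n (custom_series n)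

-- ===== LEMMAS AND PROOFS =====

-- The closed count used by B.
def csM (n : Int) : Int := (1 + (Nat.sqrt (8 * n - 7).toNat : Int)) / 2

-- the k-th term of the series (1-indexed)
def csTerm (k : Int) : Int := 1 + k * (k - 1) / 2

lemma csTerm_succ (k : Int) : csTerm k + k = csTerm (k + 1) := by
  obtain ⟨t, ht⟩ := Int.even_mul_succ_self (k - 1)
  have h1 : k * (k - 1) = 2 * t := by nlinarith [ht]
  have h2 : (k + 1) * ((k + 1) - 1) = 2 * (t + k) := by nlinarith [ht]
  simp only [csTerm, h1, h2]
  omega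

lemma sqrt_bounds (n : Int) (hn : 1 ≤ n) :
    ((Nat.sqrt (8 * n - 7).toNat : Int)) ^ 2 ≤ 8 * n - 7 ∧
    8 * n - 7 < ((Nat.sqrt (8 * n - 7).toNat : Int) + 1) ^ 2 := by
  have hpos : ((8 * n - 7).toNat : Int) = 8 * n - 7 := by omega
  have h1 := Nat.sqrt_le' (8 * n - 7).toNat
  have h2 := Nat.lt_succ_sqrt' (8 * n - 7).toNat
  constructor
  · have := (Int.ofNat_le.mpr h1)
    push_cast at this ⊢
    nlinarith [this]
  · have := (Int.ofNat_lt.mpr h2)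
    push_cast at this ⊢
    nlinarith [this]

-- the boundary characterization: term k is emitted iff k ≤ csM n
lemma csTerm_le_iff (n k : Int) (hn : 1 ≤ n) (hk : 1 ≤ k) :
    csTerm k ≤ n ↔ k ≤ csM n := by
  obtain ⟨hs1, hs2⟩ := sqrt_bounds n hn
  set s : Int := (Nat.sqrt (8 * n - 7).toNat : Int) with hsdef
  have hs0 : 0 ≤ s := by positivity
  obtain ⟨t, ht⟩ := Int.even_mul_succ_self (k - 1)
  have h1 : k * (k - 1) = 2 * t := by nlinarith [ht]
  have hterm : csTerm k = 1 + t := by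
    simp only [csTerm, h1]
    omega
  have hM : k ≤ csM n ↔ 2 * k ≤ 1 + s := by
    unfold csM
    rw [Int.le_ediv_iff_mul_le (by norm_num)]
    omega
  constructor
  · intro h
    rw [hM]
    -- from 1 + t ≤ n: (2k-1)^2 = 4·k(k-1)+1 = 8t+1 ≤ 8n-7 < (s+1)^2, so 2k-1 ≤ s
    have hq : (2 * k - 1) ^ 2 ≤ 8 * n - 7 := by nlinarith [hterm, h1]
    by_contra hc
    push_neg at hc
    have : (s + 1) ^ 2 ≤ (2 * k - 1) ^ 2 := by nlinarith
    omega
  · intro h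
    rw [hM] at h
    have hq : (2 * k - 1) ^ 2 ≤ s ^ 2 := by nlinarith
    have : (2 * k - 1) ^ 2 ≤ 8 * n - 7 := le_trans hq hs1
    have ht' : 8 * t ≤ 8 * n - 8 := by nlinarith [h1]
    omega

lemma csM_le (n : Int) (hn : 1 ≤ n) : csM n ≤ n + 1 := by
  obtain ⟨hs1, hs2⟩ := sqrt_bounds n hn
  set s : Int := (Nat.sqrt (8 * n - 7).toNat : Int) with hsdef
  have hs0 : 0 ≤ s := by positivity
  have hd := Int.ediv_add_emod (1 + s) 2
  have hm1 : 0 ≤ (1 + s) % 2 := Int.emod_nonneg _ (by norm_num)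
  have hm2 : (1 + s) % 2 < 2 := Int.emod_lt_of_pos _ (by norm_num)
  unfold csM
  nlinarith [hd, hm1, hm2, hs1, hs0]

-- loop invariant: from current = csTerm k, diff = k, the loop emits terms k, k+1, …, csM n
lemma csLoop_eq (n : Int) (hn : 1 ≤ n) :
    ∀ (fuel : Nat) (k : Int), 1 ≤ k → csM n < k + fuel →
      csLoop fuel n (csTerm k) k =
        (PySem.List.pyRange k (csM n + 1) 1).map (fun j => 1 + PySem.Int.floordiv (j * (j - 1)) 2) := by
  intro fuel
  induction fuel with
  | zero =>
    intro k hk hf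
    have hf' : csM n + 1 ≤ k := by push_cast at hf; omega
    rw [PySem.List.pyRange_one_eq_nil hf']
    simp [csLoop]
  | succ fuel ih =>
    intro k hk hf
    have hf' : csM n < (k + 1) + (fuel : Int) := by push_cast at hf; omega
    simp only [csLoop]
    by_cases h : csTerm k ≤ n
    · have hk' : k ≤ csM n := (csTerm_le_iff n k hn hk).mp h
      have htail : csLoop fuel n (csTerm k + k) (k + 1) =
          (PySem.List.pyRange (k + 1) (csM n + 1) 1).map
            (fun j => 1 + PySem.Int.floordiv (j * (j - 1)) 2) := by
        rw [csTerm_succ]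
        exact ih (k + 1) (by omega) hf'
      rw [if_pos h, htail,
        show PySem.List.pyRange k (csM n + 1) 1 = k :: PySem.List.pyRange (k + 1) (csM n + 1) 1
          from PySem.List.pyRange_one_cons (by omega), List.map_cons]
      congr 1
      rw [PySem.Int.floordiv_eq_ediv_of_pos (by norm_num)]
      rfl
    · have hk' : csM n < k := by
        by_contra hc
        exact h ((csTerm_le_iff n k hn hk).mpr (by omega))
      rw [if_neg h, PySem.List.pyRange_one_eq_nil (by omega)]
      simp

-- ===== VERDICT (by name: the statement is the Claim_ definition above) =====
theorem custom_series_spec : Claim_equal_custom_series := by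
  intro n _ hpre
  have hn : 1 ≤ n := hpre
  unfold Spec_custom_series custom_series custom_series_alt
  rw [if_neg (by omega), if_neg (by omega)]
  have hfloor : PySem.Int.floordiv (1 + (Nat.sqrt (8 * n - 7).toNat : Int)) 2 = csM n := by
    rw [PySem.Int.floordiv_eq_ediv_of_pos (by norm_num)]; rfl
  have hterm1 : (1 : Int) = csTerm 1 := by simp [csTerm]
  have hbound : csM n < 1 + ((n.toNat + 1 : Nat) : Int) := by
    have := csM_le n hn
    push_cast
    omega
  rw [hfloor, hterm1]
  exact csLoop_eq n hn (n.toNat + 1) 1 (by norm_num) hbound
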